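-- pv_equiv track=rewrite | github.com/gavlooth/omnilisp | tooling/omni-lsp/omni_lsp_parser_io.py | _position_to_offset
-- ===== SOURCE A (Python) =====
-- def _position_to_offset(text: str, line_number: int, character: int) -> int:
--     if line_number <= 0:
--         return max(0, min(character, len(text)))
--
--     offset = 0
--     current_line = 0
--     while current_line < line_number and offset < len(text):
--         next_newline = text.find("\n", offset)
--         if next_newline == -1:
--             return len(text)
--         offset = next_newline + 1
--         current_line += 1
--
--     line_end = text.find("\n", offset)
--     if line_end == -1:
--         line_end = len(text)
--     return min(offset + max(character, 0), line_end)
-- ===== SOURCE B (Python) =====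
-- def _position_to_offset(text: str, line_number: int, character: int) -> int:
--     if line_number <= 0:
--         return max(0, min(character, len(text)))
--     lines = text.split("\n")
--     if line_number >= len(lines):
--         return len(text)
--     start = sum(len(line) + 1 for line in lines[:line_number])
--     line_end = start + len(lines[line_number])
--     return min(start + max(character, 0), line_end)
-- ===== Notes on version B (the rewrite author's own statement) =====
-- stated objective: idiomatic
-- what changed: B splits the text into its list of lines once and computes the offset by arithmetic on line lengths (sum over the first line_number lines plus clamping), instead of A's while-loop that repeatedly calls str.find to scan forward one newline at a time.
import Mathlib
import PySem

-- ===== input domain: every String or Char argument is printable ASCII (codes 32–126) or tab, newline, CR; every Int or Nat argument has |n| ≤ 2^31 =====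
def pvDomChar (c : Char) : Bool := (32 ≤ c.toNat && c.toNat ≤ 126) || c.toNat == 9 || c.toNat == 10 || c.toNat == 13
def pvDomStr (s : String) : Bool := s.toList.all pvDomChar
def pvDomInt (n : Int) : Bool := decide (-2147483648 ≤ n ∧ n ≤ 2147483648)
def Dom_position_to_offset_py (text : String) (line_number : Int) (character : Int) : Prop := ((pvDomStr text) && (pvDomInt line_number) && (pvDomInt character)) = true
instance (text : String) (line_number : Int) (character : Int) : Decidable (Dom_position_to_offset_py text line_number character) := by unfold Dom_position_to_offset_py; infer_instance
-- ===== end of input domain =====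

-- B replaces A's while-loop of repeated str.find scans by one split("\n") plus arithmetic on line lengths (idiomatic, same cost).

-- ===== PORT A =====
-- A's while loop; `offset` is kept as a Nat (in A it is 0 or next_newline+1, both ≥ 0, so the values coincide);
-- the Python locals next_newline / line_end are the repeated findFrom terms below.
def pvALoop (s : List Char) (character : Int) (line_number : Int) (offset : Nat) (current_line : Int) : Int :=
  if h : current_line < line_number ∧ offset < s.length then
    if hn : PySem.Chars.findFrom s ['\n'] (offset : Int) = -1 then ((s.length : Int))
    else pvALoop s character line_number ((PySem.Chars.findFrom s ['\n'] (offset : Int)).toNat + 1) (current_line + 1)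
  else
    min ((offset : Int) + max character 0)
      (if PySem.Chars.findFrom s ['\n'] (offset : Int) = -1 then ((s.length : Int))
       else PySem.Chars.findFrom s ['\n'] (offset : Int))
termination_by s.length - offset
decreasing_by
  have h1 := (PySem.Chars.findFrom_natCast_spec s ['\n'] offset (Nat.le_of_lt h.2) hn).1
  omega

def position_to_offset_py (text : String) (line_number : Int) (character : Int) : Int :=
  if line_number ≤ 0 then max 0 (min character (PySem.Str.len text))
  else pvALoop text.toList character line_number 0 0

-- ===== PORT B =====
def position_to_offset_py_alt (text : String) (line_number : Int) (character : Int) : Int :=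
  if line_number ≤ 0 then max 0 (min character (PySem.Str.len text))
  else
    let lines := PySem.Chars.splitOn text.toList ['\n']
    if line_number ≥ (lines.length : Int) then PySem.Str.len text
    else
      let start : Int := ((PySem.List.slice lines none (some line_number)).map (fun l => ((l.length : Int) + 1))).sum
      let line_end : Int := start + ((PySem.List.pyGetD lines line_number []).length : Int)
      min (start + max character 0) line_end

-- ===== PRECONDITION & SPEC =====
def Spec_position_to_offset_py (text : String) (line_number : Int) (character : Int) (out : Int) : Prop := out = position_to_offset_py_alt text line_number character
instance (text : String) (line_number : Int) (character : Int) (out : Int) : Decidable (Spec_position_to_offset_py text line_number character out) := by unfold Spec_position_to_offset_py; infer_instance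

-- ===== CLAIM (what is proved, stated in full; the proofs are below) =====
def Claim_equal_position_to_offset_py : Prop := ∀ (text : String) (line_number : Int) (character : Int), Dom_position_to_offset_py text line_number character → Spec_position_to_offset_py text line_number character (position_to_offset_py text line_number character)

-- ===== LEMMAS AND PROOFS =====

-- the first line of u, i.e. everything before the first '\n'
def pvTW (u : List Char) : List Char := u.takeWhile (fun c => c != '\n')

-- simple structural model of text.split("\n")
def pvLines (s : List Char) : List (List Char) :=
  match s with
  | [] => [[]]
  | c :: t => if c = '\n' then [] :: pvLines t
              else (c :: (pvLines t).headD []) :: (pvLines t).tail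

theorem pvTW_cons_nl (t : List Char) : pvTW ('\n' :: t) = [] := by
  simp [pvTW]

theorem pvTW_cons_ne {c : Char} (t : List Char) (h : c ≠ '\n') : pvTW (c :: t) = c :: pvTW t := by
  simp [pvTW, h]

theorem pvTW_lt {u : List Char} (h : '\n' ∈ u) : (pvTW u).length < u.length := by
  induction u with
  | nil => simp at h
  | cons c t ih =>
    by_cases hc : c = '\n'
    · subst hc; simp [pvTW_cons_nl]
    · rw [pvTW_cons_ne t hc]
      have h1 : '\n' ∈ t := List.mem_of_ne_of_mem (fun he => hc he.symm) h
      simpa using ih h1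

theorem pvTW_of_not_mem {u : List Char} (h : '\n' ∉ u) : pvTW u = u := by
  induction u with
  | nil => rfl
  | cons c t ih =>
    have hc : c ≠ '\n' := fun hc => h (by simp [hc])
    rw [pvTW_cons_ne t hc, ih (fun ht => h (by simp [ht]))]

-- common value of both programs for line_number > 0, relative to the remaining text u
-- and the remaining line count r
def pvG (u : List Char) (ch : Int) (r : Int) : Int :=
  if r ≤ 0 then min (max ch 0) ((pvTW u).length : Int)
  else if h : '\n' ∈ u then
    ((pvTW u).length : Int) + 1 + pvG (u.drop ((pvTW u).length + 1)) ch (r - 1)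
  else (u.length : Int)
termination_by u.length
decreasing_by
  have h1 := pvTW_lt h
  rw [List.length_drop]
  omega

theorem pv_singleton_prefix (a : Char) (v : List Char) : [a] <+: v ↔ v.head? = some a := by
  cases v with
  | nil => simp
  | cons b t => simp [List.cons_prefix_cons, eq_comm]

theorem pv_get_tw {u : List Char} (h : '\n' ∈ u) : (u.drop (pvTW u).length).head? = some '\n' := by
  induction u with
  | nil => simp at h
  | cons c t ih =>
    by_cases hc : c = '\n'
    · subst hc; simp [pvTW_cons_nl]
    · rw [pvTW_cons_ne t hc]
      have h1 : '\n' ∈ t := List.mem_of_ne_of_mem (fun he => hc he.symm) h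
      simpa using ih h1

theorem pv_not_before {u : List Char} : ∀ i, i < (pvTW u).length → (u.drop i).head? ≠ some '\n' := by
  induction u with
  | nil => intro i hi; simp [pvTW] at hi
  | cons c t ih =>
    intro i hi
    by_cases hc : c = '\n'
    · subst hc; simp [pvTW_cons_nl] at hi
    · rw [pvTW_cons_ne t hc] at hi
      match i with
      | 0 => simpa using hc
      | i + 1 => simpa using ih i (by simpa using hi)

theorem pv_find_of_mem {u : List Char} (h : '\n' ∈ u) :
    PySem.Chars.find u ['\n'] = ((pvTW u).length : Int) := by
  have hpre : ['\n'] <+: u.drop (pvTW u).length := (pv_singleton_prefix _ _).mpr (pv_get_tw h)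
  have hin : PySem.Chars.isIn ['\n'] u = true :=
    (PySem.Chars.exists_prefix_drop_iff_isIn _ _).mp ⟨_, hpre⟩
  have hnn : 0 ≤ PySem.Chars.find u ['\n'] :=
    (PySem.Chars.find_nonneg_iff _ _).mpr ((PySem.Chars.isIn_iff_infix _ _).mp hin)
  obtain ⟨hp, hmin⟩ := PySem.Chars.find_spec hnn
  have h1 : ¬ (pvTW u).length < (PySem.Chars.find u ['\n']).toNat := fun hlt => hmin _ hlt hpre
  have h2 : ¬ (PySem.Chars.find u ['\n']).toNat < (pvTW u).length :=
    fun hlt => pv_not_before _ hlt ((pv_singleton_prefix _ _).mp hp)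
  omega

theorem pv_find_of_not_mem {u : List Char} (h : '\n' ∉ u) :
    PySem.Chars.find u ['\n'] = -1 := by
  rw [PySem.Chars.find_eq_neg_one_iff]
  intro hi
  exact h (hi.subset (by simp))

-- findFrom at a valid Nat offset, via the first-line length of the rest
theorem pv_findFrom (s : List Char) (offset : Nat) (ho : offset ≤ s.length) :
    PySem.Chars.findFrom s ['\n'] (offset : Int) =
      (if '\n' ∈ s.drop offset then ((offset : Int) + ((pvTW (s.drop offset)).length : Int)) else -1) := by
  rw [PySem.Chars.findFrom_natCast s ['\n'] offset ho]
  by_cases hm : '\n' ∈ s.drop offset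
  · rw [pv_find_of_mem hm, if_pos hm, if_neg (by omega)]
  · rw [pv_find_of_not_mem hm, if_pos rfl, if_neg hm]

theorem pvALoop_eq (s : List Char) (ch ln : Int) :
    ∀ (k : Nat) (offset : Nat) (cl : Int), s.length - offset ≤ k → offset ≤ s.length →
      pvALoop s ch ln offset cl = (offset : Int) + pvG (s.drop offset) ch (ln - cl) := by
  intro k
  induction k with
  | zero =>
    intro offset cl hk ho
    have hoe : offset = s.length := by omega
    rw [pvALoop, dif_neg (by omega)]
    have hdrop : s.drop offset = [] := by rw [hoe]; simp
    rw [pv_findFrom s offset ho, hdrop]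
    rw [pvG]
    rw [if_neg (by simp : ¬ '\n' ∈ ([] : List Char))]
    by_cases hr : ln - cl ≤ 0
    · rw [if_pos hr]
      simp only [pvTW, List.takeWhile_nil, List.length_nil, Nat.cast_zero]
      simp only [min_def, max_def]
      split_ifs <;> omega
    · rw [if_neg hr, dif_neg (by simp)]
      simp only [List.length_nil, Nat.cast_zero]
      simp only [min_def, max_def]
      split_ifs <;> omega
  | succ k ih =>
    intro offset cl hk ho
    rw [pvALoop]
    by_cases hg : cl < ln ∧ offset < s.length
    · rw [dif_pos hg]
      by_cases hm : '\n' ∈ s.drop offset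
      · -- newline found: consume one line and recurse
        have hff := pv_findFrom s offset ho
        rw [if_pos hm] at hff
        have htw := pvTW_lt hm
        have hlen : (s.drop offset).length = s.length - offset := List.length_drop ..
        rw [hff, dif_neg (by omega)]
        have htn : ((offset : Int) + ((pvTW (s.drop offset)).length : Int)).toNat + 1
            = offset + ((pvTW (s.drop offset)).length + 1) := by omega
        rw [htn]
        rw [ih (offset + ((pvTW (s.drop offset)).length + 1)) (cl + 1) (by omega) (by omega)]
        conv_rhs => rw [pvG]
        rw [if_neg (by omega : ¬ (ln - cl ≤ 0)), dif_pos hm]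
        have hdd : s.drop (offset + ((pvTW (s.drop offset)).length + 1))
            = (s.drop offset).drop ((pvTW (s.drop offset)).length + 1) := by
          rw [List.drop_drop, Nat.add_comm]
        have hc : ln - (cl + 1) = ln - cl - 1 := by ring
        rw [hdd, hc]
        push_cast
        ring
      · -- no newline in the rest: early return len(text)
        have hff := pv_findFrom s offset ho
        rw [if_neg hm] at hff
        rw [hff, dif_pos rfl]
        rw [pvG, if_neg (by omega), dif_neg hm]
        have hlen : (s.drop offset).length = s.length - offset := List.length_drop ..
        omega
    · rw [dif_neg hg]
      rw [pv_findFrom s offset ho]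
      by_cases hm : '\n' ∈ s.drop offset
      · rw [if_pos hm]
        have hne : ((offset : Int) + ((pvTW (s.drop offset)).length : Int)) ≠ -1 := by omega
        rw [if_neg hne]
        rw [pvG]
        have hr : ln - cl ≤ 0 := by
          by_contra hr
          have hoe : offset = s.length := by omega
          rw [hoe] at hm; simp at hm
        rw [if_pos hr]
        simp only [min_def, max_def]
        split_ifs <;> omega
      · rw [if_neg hm, if_pos rfl]
        rw [pvG]
        have htw : pvTW (s.drop offset) = s.drop offset := pvTW_of_not_mem hm
        have hlen : (s.drop offset).length = s.length - offset := List.length_drop ..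
        by_cases hr : ln - cl ≤ 0
        · rw [if_pos hr, htw]
          simp only [min_def, max_def]
          split_ifs <;> omega
        · rw [if_neg hr, dif_neg hm]
          simp only [min_def, max_def]
          split_ifs <;> omega

theorem pvLines_ne_nil (s : List Char) : pvLines s ≠ [] := by
  cases s with
  | nil => simp [pvLines]
  | cons c t =>
    rw [pvLines]
    by_cases hc : c = '\n' <;> simp [hc]

theorem pvLines_headD (s : List Char) : (pvLines s).headD [] = pvTW s := by
  induction s with
  | nil => simp [pvLines, pvTW]
  | cons c t ih =>
    by_cases hc : c = '\n'
    · subst hc; simp [pvLines, pvTW_cons_nl]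
    · rw [pvLines, if_neg hc, pvTW_cons_ne t hc]
      simp only [List.headD_cons]
      rw [ih]

theorem pvLines_of_not_mem {s : List Char} (h : '\n' ∉ s) : pvLines s = [s] := by
  induction s with
  | nil => rfl
  | cons c t ih =>
    have hc : c ≠ '\n' := fun hc => h (by simp [hc])
    have ht : '\n' ∉ t := fun ht => h (by simp [ht])
    rw [pvLines, if_neg hc, ih ht]
    simp

theorem pvLines_of_mem {s : List Char} (h : '\n' ∈ s) :
    pvLines s = pvTW s :: pvLines (s.drop ((pvTW s).length + 1)) := by
  induction s with
  | nil => simp at h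
  | cons c t ih =>
    by_cases hc : c = '\n'
    · subst hc
      rw [pvLines, if_pos rfl, pvTW_cons_nl]
      simp
    · have ht : '\n' ∈ t := List.mem_of_ne_of_mem (fun he => hc he.symm) h
      rw [pvLines, if_neg hc, pvTW_cons_ne t hc]
      rw [← pvLines_headD t]
      rw [ih ht]
      simp

theorem pv_splitOn_go (fuel : Nat) :
    ∀ (l cur : List Char) (accs : List (List Char)), l.length < fuel →
      PySem.Chars.splitOn.go ['\n'] fuel l cur accs
        = accs.reverse ++ (pvLines l).modifyHead (cur.reverse ++ ·) := by
  induction fuel with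
  | zero => intro l cur accs hl; omega
  | succ fuel ih =>
    intro l cur accs hl
    cases l with
    | nil =>
      rw [PySem.Chars.splitOn.go]
      simp [pvLines]
      omega
    | cons c rest =>
      rw [PySem.Chars.splitOn.go]
      by_cases hc : c = '\n'
      · subst hc
        rw [if_pos (by simp [List.isPrefixOf])]
        have hd : List.drop ['\n'].length ('\n' :: rest) = rest := rfl
        rw [hd]
        rw [ih rest [] _ (by simpa using hl)]
        rw [pvLines, if_pos rfl]
        rcases hpl : pvLines rest with _ | ⟨x, xs⟩
        · exact absurd hpl (pvLines_ne_nil rest)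
        · simp
      · rw [if_neg (by simp [List.isPrefixOf, Ne.symm hc])]
        rw [ih rest (c :: cur) accs (by simpa using hl)]
        rw [pvLines, if_neg hc]
        rcases hpl : pvLines rest with _ | ⟨x, xs⟩
        · exact absurd hpl (pvLines_ne_nil rest)
        · simp

theorem pv_splitOn_eq (s : List Char) : PySem.Chars.splitOn s ['\n'] = pvLines s := by
  rw [PySem.Chars.splitOn]
  rw [pv_splitOn_go (s.length + 1) s [] [] (by omega)]
  rcases hpl : pvLines s with _ | ⟨x, xs⟩
  · exact absurd hpl (pvLines_ne_nil s)
  · simp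

theorem pvB_nomem (s : List Char) (ch ln : Int) (hm : '\n' ∉ s) (hln : 0 ≤ ln) :
    (if ln ≥ ((pvLines s).length : Int) then ((s.length : Int))
     else
      min (((PySem.List.slice (pvLines s) none (some ln)).map (fun l => ((l.length : Int) + 1))).sum + max ch 0)
          (((PySem.List.slice (pvLines s) none (some ln)).map (fun l => ((l.length : Int) + 1))).sum
            + ((PySem.List.pyGetD (pvLines s) ln []).length : Int)))
    = pvG s ch ln := by
  rw [pvLines_of_not_mem hm]
  by_cases h1 : ln ≥ (([s] : List (List Char)).length : Int)
  · rw [if_pos h1]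
    rw [pvG, if_neg (by simp at h1; omega), dif_neg hm]
  · rw [if_neg h1]
    have h0 : ln = 0 := by simp at h1; omega
    subst h0
    rw [PySem.List.slice_to _ (by omega)]
    simp only [Int.toNat_zero, List.take_zero, List.map_nil, List.sum_nil]
    rw [PySem.List.pyGetD_zero_cons]
    rw [pvG, if_pos (le_refl 0), pvTW_of_not_mem hm]
    simp only [min_def, max_def]
    split_ifs <;> omega

theorem pvB_eq_G (n : Nat) :
    ∀ (s : List Char) (ch ln : Int), s.length ≤ n → 0 ≤ ln →
      (if ln ≥ ((pvLines s).length : Int) then ((s.length : Int))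
       else
        min (((PySem.List.slice (pvLines s) none (some ln)).map (fun l => ((l.length : Int) + 1))).sum + max ch 0)
            (((PySem.List.slice (pvLines s) none (some ln)).map (fun l => ((l.length : Int) + 1))).sum
              + ((PySem.List.pyGetD (pvLines s) ln []).length : Int)))
      = pvG s ch ln := by
  induction n with
  | zero =>
    intro s ch ln hn hln
    have hs : s = [] := List.length_eq_zero_iff.mp (by omega)
    subst hs
    exact pvB_nomem [] ch ln (by simp) hln
  | succ n ih =>
    intro s ch ln hn hln
    by_cases hm : '\n' ∈ s
    swap
    · exact pvB_nomem s ch ln hm hln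
    · have htw := pvTW_lt hm
      have hlen' : (s.drop ((pvTW s).length + 1)).length ≤ n := by
        rw [List.length_drop]; omega
      have hL1 : 0 < (pvLines (s.drop ((pvTW s).length + 1))).length :=
        List.length_pos_of_ne_nil (pvLines_ne_nil _)
      rw [pvLines_of_mem hm]
      by_cases hge : ln ≥ (((pvTW s :: pvLines (s.drop ((pvTW s).length + 1))).length : Nat) : Int)
      · rw [if_pos hge]
        rw [pvG, if_neg (by simp at hge; omega), dif_pos hm]
        rw [← ih (s.drop ((pvTW s).length + 1)) ch (ln - 1) hlen' (by simp at hge; omega)]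
        rw [if_pos (by simp at hge ⊢; omega)]
        rw [List.length_drop]
        simp at hge
        omega
      · rw [if_neg hge]
        rw [PySem.List.slice_to _ hln]
        rcases hm0 : ln.toNat with _ | m
        · -- ln = 0
          have h0 : ln = 0 := by omega
          subst h0
          simp only [List.take_zero, List.map_nil, List.sum_nil]
          rw [PySem.List.pyGetD_zero_cons]
          rw [pvG, if_pos (le_refl 0)]
          simp only [min_def, max_def]
          split_ifs <;> omega
        · -- ln = m + 1
          have hlm : ln = ((m + 1 : Nat) : Int) := by omega
          rw [hlm]
          rw [List.take_succ_cons]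
          simp only [List.map_cons, List.sum_cons]
          rw [PySem.List.pyGetD_natCast, List.getD_cons_succ]
          rw [pvG, if_neg (by omega), dif_pos hm]
          rw [← ih (s.drop ((pvTW s).length + 1)) ch (((m + 1 : Nat) : Int) - 1) hlen' (by omega)]
          have hm' : (((m + 1 : Nat) : Int) - 1) = ((m : Nat) : Int) := by omega
          rw [hm']
          have hlt : ¬ ((m : Nat) : Int) ≥ ((pvLines (s.drop ((pvTW s).length + 1))).length : Int) := by
            simp at hge
            omega
          rw [if_neg hlt]
          rw [PySem.List.slice_to _ (by omega)]
          rw [PySem.List.pyGetD_natCast]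
          simp only [Int.toNat_natCast]
          simp only [min_def, max_def]
          split_ifs <;> omega

-- ===== VERDICT (by name: the statement is the Claim_ definition above) =====
theorem position_to_offset_py_spec : Claim_equal_position_to_offset_py := by
  intro text ln ch _
  unfold Spec_position_to_offset_py position_to_offset_py position_to_offset_py_alt
  by_cases h0 : ln ≤ 0
  · simp [h0]
  · simp only [h0, if_false, PySem.Str.len_eq]
    rw [pvALoop_eq text.toList ch ln (text.toList.length) 0 0 (by omega) (by omega)]
    rw [pv_splitOn_eq]
    simp only [List.drop_zero, Nat.cast_zero, zero_add, sub_zero]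
    rw [← pvB_eq_G text.toList.length text.toList ch ln (by omega) (by omega)]
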